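-- pv_equiv track=rewrite | github.com/Maxim2710/DigitalDepartmentofArtificialIntelligence | contest_02/task15/15.py | leg_count_in_longest_sequence
-- ===== SOURCE A (Python) =====
-- def leg_count_in_longest_sequence(legs):
--     if not legs:
--         return None
--
--     max_length = 0
--     max_number = legs[0]
--
--     current_length = 1
--     current_number = legs[0]
--
--     for i in range(1, len(legs)):
--         if legs[i] == current_number:
--             current_length += 1
--         else:
--             if current_length > max_length:
--                 max_length = current_length
--                 max_number = current_number
--             current_number = legs[i]
--             current_length = 1
--
--     if current_length > max_length:
--         max_number = current_number
--
--     return max_number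
-- ===== SOURCE B (Python) =====
-- from itertools import groupby
--
-- def leg_count_in_longest_sequence(legs):
--     if not legs:
--         return None
--     runs = [(v, sum(1 for _ in g)) for v, g in groupby(legs)]
--     return max(runs, key=lambda p: p[1])[0]
-- ===== Notes on version B (the rewrite author's own statement) =====
-- stated objective: idiomatic
-- what changed: Replaced the inline running-counter loop with a two-phase decomposition: itertools.groupby materialises the (value, run-length) pairs, then max with a length key picks the first longest run.
import Mathlib
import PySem

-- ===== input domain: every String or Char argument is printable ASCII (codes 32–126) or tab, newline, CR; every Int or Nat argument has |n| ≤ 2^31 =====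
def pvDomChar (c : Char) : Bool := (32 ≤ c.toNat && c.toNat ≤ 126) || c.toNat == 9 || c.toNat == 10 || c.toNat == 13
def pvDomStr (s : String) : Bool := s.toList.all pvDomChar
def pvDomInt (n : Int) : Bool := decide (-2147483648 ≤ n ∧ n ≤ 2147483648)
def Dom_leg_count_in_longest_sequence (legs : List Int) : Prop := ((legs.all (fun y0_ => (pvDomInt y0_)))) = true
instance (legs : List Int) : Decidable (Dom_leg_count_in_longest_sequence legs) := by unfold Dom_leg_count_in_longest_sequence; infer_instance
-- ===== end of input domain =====

-- B replaces A's inline running-counter loop by a two-phase groupby-then-max decomposition (idiomatic; same cost).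


-- ===== PORT A =====
-- A's loop 'for i in range(1, len(legs))' reads legs[i] in order: ported as a fold over the tail,
-- with the same 4-tuple state (max_length, max_number, current_length, current_number).
def legStepA (st : Int × Int × Int × Int) (y : Int) : Int × Int × Int × Int :=
  let (mL, mN, cL, cN) := st
  if y = cN then (mL, mN, cL + 1, cN)
  else if cL > mL then (cL, cN, 1, y)
  else (mL, mN, 1, y)

def leg_count_in_longest_sequence (legs : List Int) : Option Int :=
  match legs with
  | [] => none
  | x :: xs =>
    let s := xs.foldl legStepA (0, x, 1, x)
    let (mL, mN, cL, cN) := s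
    some (if cL > mL then cN else mN)

-- ===== PORT B =====
-- groupby(legs): the consecutive runs as (value, length) pairs, built left to right.
def legRuns (cur : Int) (cnt : Int) (xs : List Int) : List (Int × Int) :=
  match xs with
  | [] => [(cur, cnt)]
  | y :: ys => if y = cur then legRuns cur (cnt + 1) ys else (cur, cnt) :: legRuns y 1 ys

-- Python's max(runs, key=λp. p[1]): first pair with maximal second component (strict-greater update).
def legMaxBySnd (b : Int × Int) (rs : List (Int × Int)) : Int × Int :=
  rs.foldl (fun b p => if p.2 > b.2 then p else b) b

def leg_count_in_longest_sequence_alt (legs : List Int) : Option Int :=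
  match legs with
  | [] => none
  | x :: xs =>
    match legRuns x 1 xs with
    | [] => none  -- unreachable: legRuns is never empty
    | r :: rest => some ((legMaxBySnd r rest).1)

-- ===== PRECONDITION & SPEC =====
def Spec_leg_count_in_longest_sequence (legs : List Int) (out : Option Int) : Prop := out = leg_count_in_longest_sequence_alt legs
instance (legs : List Int) (out : Option Int) : Decidable (Spec_leg_count_in_longest_sequence legs out) := by unfold Spec_leg_count_in_longest_sequence; infer_instance

-- ===== CLAIM (what is proved, stated in full; the proofs are below) =====
def Claim_equal_leg_count_in_longest_sequence : Prop := ∀ (legs : List Int), Dom_leg_count_in_longest_sequence legs → Spec_leg_count_in_longest_sequence legs (leg_count_in_longest_sequence legs)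

-- ===== LEMMAS AND PROOFS =====

-- finalization of A's loop state
def legFin (st : Int × Int × Int × Int) : Int :=
  let (mL, mN, cL, cN) := st
  if cL > mL then cN else mN

-- Main invariant: A's finished loop with best-so-far (mL, mN) and current run (cN=cur, cL=cnt)
-- computes the first-max over the runs of cur·cnt·xs seeded with (mN, mL).
theorem legMain (xs : List Int) : ∀ (cur cnt mL mN : Int),
    legFin (xs.foldl legStepA (mL, mN, cnt, cur)) =
      (legMaxBySnd (mN, mL) (legRuns cur cnt xs)).1 := by
  induction xs with
  | nil =>
    intro cur cnt mL mN
    simp only [List.foldl, legFin, legRuns, legMaxBySnd, List.foldl]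
    split_ifs with h <;> simp_all
  | cons y ys ih =>
    intro cur cnt mL mN
    simp only [List.foldl, legStepA, legRuns]
    by_cases hy : y = cur
    · simp [hy, ih]
    · simp only [if_neg hy]
      by_cases hc : cnt > mL
      · simp only [if_pos hc, ih]
        simp [legMaxBySnd, List.foldl, hc]
      · simp only [if_neg hc, ih]
        simp [legMaxBySnd, List.foldl, hc]

-- legRuns always produces a head pair whose length is at least the seed count.
theorem legRuns_head (xs : List Int) : ∀ (cur cnt : Int),
    ∃ v c rest, legRuns cur cnt xs = (v, c) :: rest ∧ cnt ≤ c := by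
  induction xs with
  | nil => intro cur cnt; exact ⟨cur, cnt, [], rfl, le_refl _⟩
  | cons y ys ih =>
    intro cur cnt
    by_cases hy : y = cur
    · obtain ⟨v, c, rest, h, hle⟩ := ih cur (cnt + 1)
      exact ⟨v, c, rest, by simp [legRuns, hy, h], by omega⟩
    · exact ⟨cur, cnt, legRuns y 1 ys, by simp [legRuns, hy], le_refl _⟩

-- ===== VERDICT (by name: the statement is the Claim_ definition above) =====
theorem leg_count_in_longest_sequence_spec : Claim_equal_leg_count_in_longest_sequence := by
  intro legs _
  unfold Spec_leg_count_in_longest_sequence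
  match legs with
  | [] => rfl
  | x :: xs =>
    have hmain := legMain xs x 1 0 x
    obtain ⟨v, c, rest, hruns, hc⟩ := legRuns_head xs x 1
    simp only [leg_count_in_longest_sequence, leg_count_in_longest_sequence_alt, hruns] at *
    have : legMaxBySnd (x, 0) ((v, c) :: rest) = legMaxBySnd (v, c) rest := by
      have hc0 : (0:Int) < c := by omega
      simp [legMaxBySnd, List.foldl, hc0]
    rw [this] at hmain
    rw [← hmain]
    rcases h : xs.foldl legStepA (0, x, 1, x) with ⟨mL, mN, cL, cN⟩
    simp [legFin]
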